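-- pv_equiv track=rewrite | github.com/yehnan/python_book_yehnan | ch02/ch02ex2.7_answer.py | plateau
-- ===== SOURCE A (Python) =====
-- def plateau(data):
--     if len(data) == 0:
--         return None
--                               # 記錄到目前為止找到的最長平台
--     result_i_max = 0          # 一開始先把索引值0的元素當做最長平台
--     result_x_max = data[0]    # 記錄該平台的整數，最後會成為此函式的回傳
--     count_max = 1             # 該平台的長度，目前是1
--
--                               # 記錄目前正在處理中的平台
--     result_i = 0              # 從索引值0開始處理
--     result_x = data[0]        # 記錄該平台的整數
--     count = 1                 # 該平台的長度，目前是1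
--
--     for i in range(1, len(data)):          # 從索引值1開始
--                                             # 檢查該元素（整數）是否大於前一平台，
--         if data[i] > result_x:             # 若大於代表進入新的平台
--             if count > count_max:          # 檢查前一平台的長度是否較長
--                 result_i_max = result_i
--                 result_x_max = result_x
--                 count_max = count
--             result_i = i                   # 進入新的平台了，
--             result_x = data[i]             # 所以重新設定目前正在處理的平台
--             count = 1
--         else: # data[i] == result_x:       # 若元素（整數）等於前一平台，該平台的長度加一
--             count += 1                     # 換句話說，該平台繼續延伸
--
--     return result_x_max                    # 此題目要求回傳result_x_max，
-- ===== SOURCE B (Python) =====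
-- def plateau(data):
--     if len(data) == 0:
--         return None
--     # A plateau stretches from one record (a new running maximum) to the
--     # next; its length is the distance between the two record positions.
--     records = []
--     hi = None
--     for i, x in enumerate(data):
--         if hi is None or x > hi:
--             records.append((x, i))
--             hi = x
--     best_v, best_l = data[0], 1
--     for (v, i), (_, k) in zip(records, records[1:]):
--         if k - i > best_l:
--             best_v, best_l = v, k - i
--     return best_v
-- ===== Notes on version B (the rewrite author's own statement) =====
-- stated objective: alternative
-- what changed: B replaces A's single loop of interleaved run-counter and best-so-far bookkeeping by a two-phase record/gap algorithm: collect the positions of strict running-maximum records, then pick the value at the earliest record with the largest gap to the next record.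
import Mathlib
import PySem

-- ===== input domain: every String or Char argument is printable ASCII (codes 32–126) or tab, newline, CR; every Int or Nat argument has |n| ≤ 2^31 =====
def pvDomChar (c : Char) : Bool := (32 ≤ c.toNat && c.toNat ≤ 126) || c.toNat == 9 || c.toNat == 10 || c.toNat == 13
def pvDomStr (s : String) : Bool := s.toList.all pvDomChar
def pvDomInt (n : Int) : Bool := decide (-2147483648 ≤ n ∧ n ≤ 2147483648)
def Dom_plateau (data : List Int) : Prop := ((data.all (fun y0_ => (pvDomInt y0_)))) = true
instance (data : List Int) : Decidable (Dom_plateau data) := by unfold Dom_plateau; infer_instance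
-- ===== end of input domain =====

-- B replaces A's single loop of interleaved run-counter/best bookkeeping by a two-phase
-- record/gap algorithm (alternative decomposition, same O(n) cost).

-- ===== PORT A =====
-- A's loop state, in A's variable order.
structure PlateauStA where
  imax : Int
  xmax : Int
  cmax : Int
  icur : Int
  xcur : Int
  cnt  : Int
deriving DecidableEq, Repr

def plateauStepA (s : PlateauStA) (i x : Int) : PlateauStA :=
  if x > s.xcur then
    if s.cnt > s.cmax then ⟨s.icur, s.xcur, s.cnt, i, x, 1⟩
    else ⟨s.imax, s.xmax, s.cmax, i, x, 1⟩
  else { s with cnt := s.cnt + 1 }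

def plateau (data : List Int) : Option Int :=
  match data with
  | [] => none  -- if len(data) == 0: return None
  | d0 :: _ =>  -- d0 = data[0]
    -- for i in range(1, len(data)): … data[i] …  (i always in range, so pyGetD is exact)
    let s := (PySem.List.pyRange 1 (PySem.List.len data) 1).foldl
      (fun acc i => plateauStepA acc i (PySem.List.pyGetD data i 0)) ⟨0, d0, 1, 0, d0, 1⟩
    some s.xmax

-- ===== PORT B =====
-- phase 1 body: state = (records, hi); records entries are (value, index)
def plateauRecStep (s : List (Int × Int) × Option Int) (p : Int × Int) : List (Int × Int) × Option Int :=
  match s.2 with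
  | none => (s.1 ++ [(p.2, p.1)], some p.2)
  | some hi => if p.2 > hi then (s.1 ++ [(p.2, p.1)], some p.2) else s

-- phase 2 body: b = (best_v, best_l); pr = a consecutive pair of records
def plateauBestStep (b : Int × Int) (pr : (Int × Int) × (Int × Int)) : Int × Int :=
  if pr.2.2 - pr.1.2 > b.2 then (pr.1.1, pr.2.2 - pr.1.2) else b

def plateau_alt (data : List Int) : Option Int :=
  match data with
  | [] => none
  | d0 :: _ =>
    let recs := ((PySem.List.enumerate data).foldl plateauRecStep ([], none)).1
    let best := (recs.zip recs.tail).foldl plateauBestStep (d0, 1)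
    some best.1

-- ===== PRECONDITION & SPEC =====
def Spec_plateau (data : List Int) (out : Option Int) : Prop := out = plateau_alt data
instance (data : List Int) (out : Option Int) : Decidable (Spec_plateau data out) := by unfold Spec_plateau; infer_instance

-- ===== CLAIM =====
def Claim_equal_plateau : Prop := ∀ (data : List Int), Dom_plateau data → Spec_plateau data (plateau data)

-- ===== LEMMAS AND PROOFS =====
-- common intermediate: scan the enumerated tail, updating the best pair at each new record
def plateauGo (b : Int × Int) (lastv lasti : Int) : List (Int × Int) → Int × Int
  | [] => b
  | (i, x) :: t =>
    if x > lastv then plateauGo (plateauBestStep b ((lastv, lasti), (x, i))) x i t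
    else plateauGo b lastv lasti t

def plateauRecsGo (lastv : Int) : List (Int × Int) → List (Int × Int)
  | [] => []
  | (i, x) :: t => if x > lastv then (x, i) :: plateauRecsGo x t else plateauRecsGo lastv t

def plateauHi (lastv : Int) : List (Int × Int) → Int
  | [] => lastv
  | (_, x) :: t => if x > lastv then plateauHi x t else plateauHi lastv t

theorem plateau_lemA (rest : List Int) :
    ∀ (n lasti lastv imax cnt : Int) (b : Int × Int), cnt = n - lasti →
    (((PySem.List.enumerate rest n).foldl (fun acc p => plateauStepA acc p.1 p.2)
        ⟨imax, b.1, b.2, lasti, lastv, cnt⟩).xmax,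
     ((PySem.List.enumerate rest n).foldl (fun acc p => plateauStepA acc p.1 p.2)
        ⟨imax, b.1, b.2, lasti, lastv, cnt⟩).cmax)
      = plateauGo b lastv lasti (PySem.List.enumerate rest n) := by
  induction rest with
  | nil => intro n lasti lastv imax cnt b h; simp [PySem.List.enumerate, plateauGo]
  | cons x rest ih =>
    intro n lasti lastv imax cnt b h
    rw [PySem.List.enumerate_cons]
    simp only [List.foldl_cons, plateauGo, plateauStepA, plateauBestStep]
    by_cases hx : x > lastv
    · simp only [hx, if_true, h]
      by_cases hc : n - lasti > b.2
      · simp only [hc, if_true]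
        have := ih (n + 1) n x lasti 1 ((lastv, n - lasti)) (by ring)
        simpa [plateauStepA] using this
      · simp only [hc, if_false]
        have := ih (n + 1) n x imax 1 b (by ring)
        simpa [plateauStepA] using this
    · simp only [hx, if_false]
      have := ih (n + 1) lasti lastv imax (cnt + 1) b (by omega)
      simpa [plateauStepA] using this

theorem plateau_lemB1 (t : List (Int × Int)) :
    ∀ (pre : List (Int × Int)) (lastv : Int),
    t.foldl plateauRecStep (pre, some lastv)
      = (pre ++ plateauRecsGo lastv t, some (plateauHi lastv t)) := by
  induction t with
  | nil => intro pre lastv; simp [plateauRecsGo, plateauHi]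
  | cons p t ih =>
    intro pre lastv
    obtain ⟨i, x⟩ := p
    simp only [List.foldl_cons, plateauRecStep]
    by_cases hx : x > lastv <;> simp [hx, plateauRecsGo, plateauHi, ih]

theorem plateau_lemB2 (t : List (Int × Int)) :
    ∀ (lastv lasti : Int) (b : Int × Int),
    ((((lastv, lasti) :: plateauRecsGo lastv t).zip (plateauRecsGo lastv t)).foldl
        plateauBestStep b)
      = plateauGo b lastv lasti t := by
  induction t with
  | nil => intro lastv lasti b; simp [plateauRecsGo, plateauGo]
  | cons p t ih =>
    intro lastv lasti b
    obtain ⟨i, x⟩ := p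
    simp only [plateauRecsGo, plateauGo]
    by_cases hx : x > lastv
    · simp only [hx, if_true, List.zip_cons_cons, List.foldl_cons]
      exact ih x i (plateauBestStep b ((lastv, lasti), (x, i)))
    · simp only [hx, if_false]
      exact ih lastv lasti b

-- ===== VERDICT =====
theorem plateau_spec : Claim_equal_plateau := by
  intro data _
  unfold Spec_plateau plateau plateau_alt
  match data with
  | [] => rfl
  | d0 :: rest =>
    simp only
    -- rewrite A's range-indexed fold as a fold over the enumerated tail
    have hlen : PySem.List.len (d0 :: rest) = ((d0 :: rest).length : Int) := by
      simp [PySem.List.len]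
    have henum := PySem.List.enumerate_eq_map_pyRange (d0 :: rest) 0
    rw [PySem.List.enumerate_cons] at henum
    rw [hlen] at henum ⊢
    rw [show PySem.List.pyRange 0 ((d0 :: rest).length : Int) 1
          = 0 :: PySem.List.pyRange 1 ((d0 :: rest).length : Int) 1 from
        PySem.List.pyRange_one_cons (by exact_mod_cast Nat.succ_pos rest.length)] at henum
    simp only [List.map_cons] at henum
    have htail : (PySem.List.pyRange 1 ((d0 :: rest).length : Int) 1).map
        (fun j => (j, PySem.List.pyGetD (d0 :: rest) j 0)) = PySem.List.enumerate rest 1 :=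
      (List.cons.injEq _ _ _ _).mp henum.symm |>.2
    have hA : (PySem.List.pyRange 1 ((d0 :: rest).length : Int) 1).foldl
        (fun acc i => plateauStepA acc i (PySem.List.pyGetD (d0 :: rest) i 0))
        ⟨0, d0, 1, 0, d0, 1⟩
        = (PySem.List.enumerate rest 1).foldl (fun acc p => plateauStepA acc p.1 p.2)
            ⟨0, d0, 1, 0, d0, 1⟩ := by
      rw [← htail, List.foldl_map]
    rw [hA]
    -- B's phases: records = (d0, 0) :: plateauRecsGo d0 (enumerate rest 1)
    rw [PySem.List.enumerate_cons]
    simp only [List.foldl_cons]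
    have h0 : plateauRecStep ([], none) (0, d0) = ([(d0, 0)], some d0) := rfl
    rw [h0, plateau_lemB1]
    simp only [List.cons_append, List.nil_append, List.tail_cons]
    rw [plateau_lemB2]
    have h := plateau_lemA rest 1 0 d0 0 1 (d0, 1) (by ring)
    have h1 : ((PySem.List.enumerate rest 1).foldl (fun acc p => plateauStepA acc p.1 p.2)
        ⟨0, d0, 1, 0, d0, 1⟩).xmax = (plateauGo (d0, 1) d0 0 (PySem.List.enumerate rest 1)).1 :=
      congrArg Prod.fst h
    rw [show (0 : Int) + 1 = 1 from rfl, h1]
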